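-- pv_equiv track=rewrite | github.com/vector67/advent-of-code-2019 | Day 3/3-2.py | calculate_single_wire_distance
-- ===== SOURCE A (Python) =====
-- def within(x, x1, x2):
--     return (x < x1 and x > x2) or (x > x1 and x < x2)
--
-- def calculate_single_wire_distance(intersection, wire):
--     distance_thus_far = 0
--     for i in range(1, len(wire)):
--         pointa = wire[i - 1]
--         pointb = wire[i]
--         going_right_or_leftab = abs(pointa[0] - pointb[0])
--         if going_right_or_leftab > 0:
--             if pointa[1] == intersection[1] and within(intersection[0], pointa[0], pointb[0]):
--                 return distance_thus_far + abs(pointa[0] - intersection[0])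
--             distance_thus_far += going_right_or_leftab
--         else:
--             if pointa[0] == intersection[0] and within(intersection[1], pointa[1], pointb[1]):
--                 return distance_thus_far + abs(pointa[1] - intersection[1])
--             distance_thus_far += abs(pointa[1] - pointb[1])
-- ===== SOURCE B (Python) =====
-- def calculate_single_wire_distance(intersection, wire):
--     segs = list(zip(wire, wire[1:]))
--     lengths = [abs(a[0] - b[0]) if a[0] != b[0] else abs(a[1] - b[1]) for a, b in segs]
--     prefix = [0]
--     for length in lengths:
--         prefix.append(prefix[-1] + length)
--     for (a, b), d in zip(segs, prefix):
--         if a[0] != b[0]: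
--             if a[1] == intersection[1] and min(a[0], b[0]) < intersection[0] < max(a[0], b[0]):
--                 return d + abs(a[0] - intersection[0])
--         else:
--             if a[0] == intersection[0] and min(a[1], b[1]) < intersection[1] < max(a[1], b[1]):
--                 return d + abs(a[1] - intersection[1])
--     return None
-- ===== Notes on version B (the rewrite author's own statement) =====
-- stated objective: alternative
-- what changed: B replaces the index loop with a running accumulator by three passes: build the consecutive-segment list, a prefix-sum table of cumulative segment lengths, then scan segments zipped with the table and read the distance from it; the strict containment test uses min/max instead of the within disjunction.
import Mathlib
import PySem

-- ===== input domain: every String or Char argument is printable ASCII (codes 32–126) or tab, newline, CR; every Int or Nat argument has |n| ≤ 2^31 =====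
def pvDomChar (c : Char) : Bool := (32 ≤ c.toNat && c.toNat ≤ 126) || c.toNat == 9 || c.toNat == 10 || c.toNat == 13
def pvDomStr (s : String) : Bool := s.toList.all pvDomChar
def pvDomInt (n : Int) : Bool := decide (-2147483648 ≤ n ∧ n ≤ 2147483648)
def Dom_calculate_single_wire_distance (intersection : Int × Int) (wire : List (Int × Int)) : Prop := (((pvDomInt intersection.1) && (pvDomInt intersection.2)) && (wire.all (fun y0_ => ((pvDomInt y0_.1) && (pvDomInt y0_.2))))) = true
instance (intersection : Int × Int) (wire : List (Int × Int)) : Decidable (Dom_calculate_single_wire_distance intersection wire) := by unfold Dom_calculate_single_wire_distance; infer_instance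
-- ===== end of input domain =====

-- B restructures A's single accumulating scan into three passes (segment list, prefix-sum table
-- of cumulative lengths, then a scan reading the distance from the table); same return value.

-- ===== PORT A =====
-- helper 'within' of A
def pvWithin (x x1 x2 : Int) : Bool := (x < x1 && x > x2) || (x > x1 && x < x2)

-- A's for-loop over i in range(1, len(wire)) reading wire[i-1], wire[i], as the obvious
-- structural recursion over the consecutive points, carrying distance_thus_far.
def pvLoopA (q : Int × Int) : List (Int × Int) → Int → Option Int
  | pa :: pb :: rest, dist =>
    let ab := |pa.1 - pb.1|
    if ab > 0 then
      if pa.2 = q.2 && pvWithin q.1 pa.1 pb.1 then some (dist + |pa.1 - q.1|)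
      else pvLoopA q (pb :: rest) (dist + ab)
    else
      if pa.1 = q.1 && pvWithin q.2 pa.2 pb.2 then some (dist + |pa.2 - q.2|)
      else pvLoopA q (pb :: rest) (dist + |pa.2 - pb.2|)
  | _, _ => none

def calculate_single_wire_distance (intersection : Int × Int) (wire : List (Int × Int)) : Option Int :=
  pvLoopA intersection wire 0

-- ===== PORT B =====
def pvSegs (wire : List (Int × Int)) : List ((Int × Int) × (Int × Int)) :=
  wire.zip (wire.drop 1)

def pvSegLen (s : (Int × Int) × (Int × Int)) : Int :=
  if s.1.1 ≠ s.2.1 then |s.1.1 - s.2.1| else |s.1.2 - s.2.2|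

-- prefix = [0]; for length in lengths: prefix.append(prefix[-1] + length)
def pvPrefix (lengths : List Int) : List Int :=
  lengths.foldl (fun acc L => acc ++ [acc.getLast! + L]) [0]

def pvSearchB (q : Int × Int) : List (((Int × Int) × (Int × Int)) × Int) → Option Int
  | [] => none
  | (s, d) :: rest =>
    if s.1.1 ≠ s.2.1 then
      if s.1.2 = q.2 && (min s.1.1 s.2.1 < q.1 && q.1 < max s.1.1 s.2.1) then
        some (d + |s.1.1 - q.1|)
      else pvSearchB q rest
    else
      if s.1.1 = q.1 && (min s.1.2 s.2.2 < q.2 && q.2 < max s.1.2 s.2.2) then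
        some (d + |s.1.2 - q.2|)
      else pvSearchB q rest

def calculate_single_wire_distance_alt (intersection : Int × Int) (wire : List (Int × Int)) : Option Int :=
  pvSearchB intersection ((pvSegs wire).zip (pvPrefix ((pvSegs wire).map pvSegLen)))

-- ===== PRECONDITION & SPEC =====
def Spec_calculate_single_wire_distance (intersection : Int × Int) (wire : List (Int × Int)) (out : Option Int) : Prop := out = calculate_single_wire_distance_alt intersection wire
instance (intersection : Int × Int) (wire : List (Int × Int)) (out : Option Int) : Decidable (Spec_calculate_single_wire_distance intersection wire out) := by unfold Spec_calculate_single_wire_distance; infer_instance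

-- ===== CLAIM (what is proved, stated in full; the proofs are below) =====
def Claim_equal_calculate_single_wire_distance : Prop := ∀ (intersection : Int × Int) (wire : List (Int × Int)), Dom_calculate_single_wire_distance intersection wire → Spec_calculate_single_wire_distance intersection wire (calculate_single_wire_distance intersection wire)

-- ===== LEMMAS AND PROOFS =====

-- the pure scan the prefix loop computes
def pvScanFrom (d : Int) : List Int → List Int
  | [] => [d]
  | L :: ls => d :: pvScanFrom (d + L) ls

theorem pvPrefix_foldl (ls : List Int) (acc0 : List Int) (d : Int) :
    ls.foldl (fun acc L => acc ++ [acc.getLast! + L]) (acc0 ++ [d]) = acc0 ++ pvScanFrom d ls := by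
  induction ls generalizing acc0 d with
  | nil => simp [pvScanFrom]
  | cons L ls ih =>
    simp only [List.foldl_cons, pvScanFrom]
    have h : (acc0 ++ [d]).getLast! = d := by simp
    rw [h]
    have := ih (acc0 ++ [d]) (d + L)
    simpa using this

theorem pvPrefix_eq_scan (ls : List Int) : pvPrefix ls = pvScanFrom 0 ls := by
  have := pvPrefix_foldl ls [] 0
  simpa [pvPrefix] using this

theorem pvWithin_eq (x x1 x2 : Int) :
    pvWithin x x1 x2 = (decide (min x1 x2 < x) && decide (x < max x1 x2)) := by
  rw [Bool.eq_iff_iff]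
  simp only [pvWithin, Bool.and_eq_true, Bool.or_eq_true, decide_eq_true_eq]
  omega

theorem pvLoopA_eq_search (q : Int × Int) (wire : List (Int × Int)) (d : Int) :
    pvLoopA q wire d =
      pvSearchB q ((pvSegs wire).zip (pvScanFrom d ((pvSegs wire).map pvSegLen))) := by
  induction wire generalizing d with
  | nil => simp [pvLoopA, pvSegs, pvSearchB]
  | cons pa rest ih =>
    cases rest with
    | nil => simp [pvLoopA, pvSegs, pvSearchB]
    | cons pb rest' =>
      have hseg : pvSegs (pa :: pb :: rest') = (pa, pb) :: pvSegs (pb :: rest') := by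
        simp [pvSegs]
      rw [hseg]
      simp only [List.map_cons, pvScanFrom, List.zip_cons_cons]
      rw [pvLoopA, pvSearchB]
      simp only [pvWithin_eq]
      by_cases hx : pa.1 = pb.1
      · rw [if_neg (show ¬ |pa.1 - pb.1| > 0 by rw [hx]; simp),
            if_neg (show ¬ pa.1 ≠ pb.1 from fun h => h hx)]
        by_cases hc : (decide (pa.1 = q.1) && (decide (min pa.2 pb.2 < q.2) && decide (q.2 < max pa.2 pb.2))) = true
        · rw [if_pos hc, if_pos hc]
        · rw [if_neg hc, if_neg hc]
          have hlen : pvSegLen (pa, pb) = |pa.2 - pb.2| := by simp [pvSegLen, hx]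
          rw [hlen]
          exact ih _
      · have hab : |pa.1 - pb.1| > 0 := abs_pos.mpr (sub_ne_zero.mpr hx)
        rw [if_pos hab, if_pos hx]
        by_cases hc : (decide (pa.2 = q.2) && (decide (min pa.1 pb.1 < q.1) && decide (q.1 < max pa.1 pb.1))) = true
        · rw [if_pos hc, if_pos hc]
        · rw [if_neg hc, if_neg hc]
          have hlen : pvSegLen (pa, pb) = |pa.1 - pb.1| := by simp [pvSegLen, hx]
          rw [hlen]
          exact ih _

-- ===== VERDICT (by name: the statement is the Claim_ definition above) =====
theorem calculate_single_wire_distance_spec : Claim_equal_calculate_single_wire_distance := by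
  intro q wire _
  unfold Spec_calculate_single_wire_distance calculate_single_wire_distance calculate_single_wire_distance_alt
  rw [pvPrefix_eq_scan]
  exact pvLoopA_eq_search q wire 0
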